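-- pv_equiv track=rewrite | github.com/m-bone/AutoMapper | LammpsSearchFuncs.py | extend_edge_atoms
-- ===== SOURCE A (Python) =====
-- def pair_search(bond, bondAtom):
--     '''
--     Check if either atomID in a bond is the desired atomID.
--     Will return None if no match is found.
--     '''
--     if bond[2] == bondAtom:
--         return bond[3]
--     elif bond[3] == bondAtom:
--         return bond[2]
--
-- def search_loop(bonds, bondAtom):
--     nextBondAtomList = []
--
--     for searchAtom in bondAtom:
--         for bond in bonds:
--             nextAtomID = pair_search(bond, searchAtom)
--             if nextAtomID is not None:
--                 nextBondAtomList.append(nextAtomID)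
--
--     return nextBondAtomList
--
-- def find_partial_structure(bondingAtoms, originalBondList, deleteAtoms, bondDistance=3):
--     # Find bonds within a specified distance of the bonding atoms
--
--     # Convert bondingAtoms to list if string given
--     if type(bondingAtoms) == str:
--         bondingAtoms = [bondingAtoms]
--
--     # Add delete atoms to valid atoms if present
--     initialValidAtoms = bondingAtoms.copy()
--     if deleteAtoms is not None:
--         initialValidAtoms.extend(deleteAtoms) # Allows partial structure tools to work when byproducts are formed and deleted
--
--     validAtomSet = set(initialValidAtoms)
--     edgeAtomList = []
--
--     for bondAtom in bondingAtoms: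
--
--         # Make bondAtom a list
--         newBondAtomList = [bondAtom]
--
--         i = 1
--         while i <= bondDistance:
--             newBondAtomList = search_loop(originalBondList, newBondAtomList)
--             if i == 1: # First pass - Stop search from finding other bonding atom if they are bound together
--                 newBondAtomList = [val for val in newBondAtomList if val not in bondingAtoms]
--
--             if i < bondDistance: # Before bond distance is reached
--                 # Add list as individual elements
--                 for atom in newBondAtomList:
--                     validAtomSet.add(atom)
--
--             else: # Once bond distance is reached
--                 # Determine which of the last obtained atom IDs have further bonds
--                 # newBondAtomList at this point contains edge atoms of an order, and other atoms found before
--                 possibleEdgeAtoms = [val for val in newBondAtomList if val not in validAtomSet]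
--
--                 # Add list as individual elements - has to be after possibleEdgeAtoms
--                 for atom in newBondAtomList:
--                     validAtomSet.add(atom)
--
--                 # Run another loop to determine if possibleEdgeAtoms have other bonds
--                 for searchAtom in possibleEdgeAtoms:
--                     bondCount = 0
--                     for bond in originalBondList:
--                         nextAtomID = pair_search(bond, searchAtom)
--                         if nextAtomID is not None:
--                             bondCount += 1
--                     if bondCount > 1: # All atoms will have at least one bond
--                         edgeAtomList.append(searchAtom)
--
--             # Increment iterator
--             i += 1
--
--     return validAtomSet, edgeAtomList
--
-- def extend_edge_atoms(extendEdgeAtomDict, originalBondList, validAtomSet):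
--     totalExtendedEdgeAtomList = []
--     for atom, bondDist in extendEdgeAtomDict.items():
--         # Shortcircuit this if bondDist is 0 - means the current edge atom is fine
--         if bondDist == 0:
--             totalExtendedEdgeAtomList.append(atom)
--
--         # Find partial structure will work with a single edge atom
--         extendedValidAtomSet, extendedEdgeAtomList = find_partial_structure(atom, originalBondList, None, bondDistance=bondDist)
--
--         # Remove edge atoms that already existed in the validAtomSet - these will be atoms closer to the original bonding atoms
--         extendedEdgeAtomList = [val for val in extendedEdgeAtomList if val not in validAtomSet]
--         validAtomSet.update(extendedValidAtomSet)
--         totalExtendedEdgeAtomList.extend(extendedEdgeAtomList)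
--
--     return validAtomSet, totalExtendedEdgeAtomList
-- ===== SOURCE B (Python) =====
-- def extend_edge_atoms(extendEdgeAtomDict, originalBondList, validAtomSet):
--     # Adjacency index: neighbors of each atom in bond order (a self-bond yields one
--     # entry), built once, the first time a search is actually needed.
--     adjacency = None
--
--     totalExtendedEdgeAtomList = []
--     for atom, bondDist in extendEdgeAtomDict.items():
--         if bondDist == 0:
--             totalExtendedEdgeAtomList.append(atom)
--
--         if bondDist >= 1 and adjacency is None:
--             adjacency = {}
--             for bond in originalBondList:
--                 a, b = bond[2], bond[3]
--                 adjacency.setdefault(a, []).append(b)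
--                 if b != a:
--                     adjacency.setdefault(b, []).append(a)
--
--         localValid = {atom}
--         edgeAtoms = []
--         frontier = [atom]
--         i = 1
--         while i <= bondDist:
--             frontier = [n for s in frontier for n in adjacency.get(s, [])]
--             if i == 1:
--                 frontier = [v for v in frontier if v != atom]
--             if i < bondDist:
--                 for x in frontier:
--                     localValid.add(x)
--             else:
--                 possible = [v for v in frontier if v not in localValid]
--                 for x in frontier:
--                     localValid.add(x)
--                 for s in possible:
--                     if len(adjacency.get(s, ())) > 1:
--                         edgeAtoms.append(s)
--             i += 1
--
--         totalExtendedEdgeAtomList.extend(v for v in edgeAtoms if v not in validAtomSet)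
--         validAtomSet.update(localValid)
--
--     return validAtomSet, totalExtendedEdgeAtomList
-- ===== Notes on version B (the rewrite author's own statement) =====
-- stated objective: faster
-- what changed: B builds a single adjacency dict from the bond list up front (neighbors per atom in bond order; degree = neighbor-list length) and expands frontiers with O(1) lookups, instead of A's rescan of the entire bond list for every frontier atom at every distance level and again for every possible edge atom.
import Mathlib
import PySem

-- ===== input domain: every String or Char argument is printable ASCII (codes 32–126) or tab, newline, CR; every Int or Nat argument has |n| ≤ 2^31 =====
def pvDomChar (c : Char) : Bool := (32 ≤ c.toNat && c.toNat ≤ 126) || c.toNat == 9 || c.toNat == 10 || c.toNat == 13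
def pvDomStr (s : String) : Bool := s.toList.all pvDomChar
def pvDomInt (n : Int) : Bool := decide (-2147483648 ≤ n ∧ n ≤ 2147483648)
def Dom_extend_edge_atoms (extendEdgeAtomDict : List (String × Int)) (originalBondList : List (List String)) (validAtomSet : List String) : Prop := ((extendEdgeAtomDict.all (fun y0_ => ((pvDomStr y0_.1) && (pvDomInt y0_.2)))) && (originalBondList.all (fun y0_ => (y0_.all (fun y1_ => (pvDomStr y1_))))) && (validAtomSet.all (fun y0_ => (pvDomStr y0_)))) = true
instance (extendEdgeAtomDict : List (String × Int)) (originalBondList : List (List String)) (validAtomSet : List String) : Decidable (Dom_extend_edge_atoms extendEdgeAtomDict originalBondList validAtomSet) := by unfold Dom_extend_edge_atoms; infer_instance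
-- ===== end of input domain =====

-- B replaces A's repeated full-bond-list scans (per frontier atom, per distance level)
-- by one precomputed adjacency dict with O(1) neighbor/degree lookups; return-value
-- equivalence only (the Python A mutates its validAtomSet argument in place, B does too).


-- ===== PORT A =====
-- pair_search: bond[2]/bond[3]; the '.getD ""' totalises the IndexError case, which
-- Pre_ excludes wherever this function is actually reached by the Python.
def pvPairSearch (bond : List String) (bondAtom : String) : Option String :=
  let b2 := (PySem.List.pyGet? bond 2).getD ""
  let b3 := (PySem.List.pyGet? bond 3).getD ""
  if b2 == bondAtom then some b3
  else if b3 == bondAtom then some b2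
  else none

-- search_loop
def pvSearchLoop (bonds : List (List String)) (bondAtom : List String) : List String :=
  bondAtom.foldl (fun acc searchAtom =>
    bonds.foldl (fun acc2 bond =>
      match pvPairSearch bond searchAtom with
      | some nextAtomID => acc2 ++ [nextAtomID]
      | none => acc2) acc) []

-- the 'bondCount' inner loop of find_partial_structure
def pvBondCount (bonds : List (List String)) (searchAtom : String) : Int :=
  bonds.foldl (fun c bond => if (pvPairSearch bond searchAtom).isSome then c + 1 else c) 0

-- the 'while i <= bondDistance' loop of find_partial_structure
def pvFpsLoop (bonds : List (List String)) (bondingAtoms : List String) (bondDist : Int)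
    (i : Int) (frontier : List String) (valid : PySem.Set String) (edges : List String) :
    PySem.Set String × List String :=
  if i ≤ bondDist then
    let newL0 := pvSearchLoop bonds frontier
    let newL := if i == 1 then newL0.filter (fun val => !(bondingAtoms.contains val)) else newL0
    if i < bondDist then
      pvFpsLoop bonds bondingAtoms bondDist (i + 1) newL (newL.foldl PySem.Set.add valid) edges
    else
      let possible := newL.filter (fun val => !(PySem.Set.contains valid val))
      let valid' := newL.foldl PySem.Set.add valid
      let edges' := possible.foldl (fun e s => if pvBondCount bonds s > 1 then e ++ [s] else e) edges
      pvFpsLoop bonds bondingAtoms bondDist (i + 1) newL valid' edges'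
  else (valid, edges)
termination_by (bondDist + 1 - i).toNat
decreasing_by all_goals omega

-- find_partial_structure as called here: bondingAtoms a single string, deleteAtoms None
def pvFindPartialStructure (bondingAtom : String) (bonds : List (List String)) (bondDistance : Int) :
    PySem.Set String × List String :=
  let bondingAtoms := [bondingAtom]
  let validAtomSet := PySem.Set.ofList bondingAtoms
  bondingAtoms.foldl (fun st bondAtom =>
    pvFpsLoop bonds bondingAtoms bondDistance 1 [bondAtom] st.1 st.2) (validAtomSet, ([] : List String))

def extend_edge_atoms (extendEdgeAtomDict : List (String × Int)) (originalBondList : List (List String)) (validAtomSet : List String) : List String × List String :=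
  (PySem.Dict.ofList extendEdgeAtomDict).items.foldl (fun st p =>
    let total := if p.2 == 0 then st.2 ++ [p.1] else st.2
    let r := pvFindPartialStructure p.1 originalBondList p.2
    let extEdge := r.2.filter (fun val => !(PySem.Set.contains st.1 val))
    (PySem.Set.update st.1 r.1, total ++ extEdge))
    (PySem.Set.ofList validAtomSet, ([] : List String))

-- ===== PORT B =====
-- adjacency index: neighbors of each atom in bond order (a self-bond yields one entry).
-- Source B builds this lazily on first search; the eager build is exact on Pre_, where the
-- bond fields are either well-formed or the index is never consulted.
def pvAdjacency (bonds : List (List String)) : PySem.Dict String (List String) :=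
  bonds.foldl (fun adj bond =>
    let a := (PySem.List.pyGet? bond 2).getD ""
    let b := (PySem.List.pyGet? bond 3).getD ""
    let adj2 := adj.insert a (adj.getD a [] ++ [b])
    if b != a then adj2.insert b (adj2.getD b [] ++ [a]) else adj2) PySem.Dict.empty

-- the 'while i <= bondDist' loop of B
def pvAltLoop (adj : PySem.Dict String (List String)) (atom : String) (bondDist : Int)
    (i : Int) (frontier : List String) (valid : PySem.Set String) (edges : List String) :
    PySem.Set String × List String :=
  if i ≤ bondDist then
    let newL0 := frontier.foldl (fun acc s => acc ++ adj.getD s []) []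
    let newL := if i == 1 then newL0.filter (fun v => !(v == atom)) else newL0
    if i < bondDist then
      pvAltLoop adj atom bondDist (i + 1) newL (newL.foldl PySem.Set.add valid) edges
    else
      let possible := newL.filter (fun v => !(PySem.Set.contains valid v))
      let valid' := newL.foldl PySem.Set.add valid
      let edges' := possible.foldl (fun e s => if (adj.getD s []).length > 1 then e ++ [s] else e) edges
      pvAltLoop adj atom bondDist (i + 1) newL valid' edges'
  else (valid, edges)
termination_by (bondDist + 1 - i).toNat
decreasing_by all_goals omega

def extend_edge_atoms_alt (extendEdgeAtomDict : List (String × Int)) (originalBondList : List (List String)) (validAtomSet : List String) : List String × List String :=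
  let adj := pvAdjacency originalBondList
  (PySem.Dict.ofList extendEdgeAtomDict).items.foldl (fun st p =>
    let total := if p.2 == 0 then st.2 ++ [p.1] else st.2
    let r := pvAltLoop adj p.1 p.2 1 [p.1] (PySem.Set.ofList [p.1]) []
    let extEdge := r.2.filter (fun v => !(PySem.Set.contains st.1 v))
    (PySem.Set.update st.1 r.1, total ++ extEdge))
    (PySem.Set.ofList validAtomSet, ([] : List String))

-- ===== PRECONDITION & SPEC =====
-- Pre_ excludes exactly the inputs where the Python A raises IndexError: a bond record
-- with fewer than 4 fields is read (at indices 2/3) as soon as any entry of the dict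
-- asks for a positive bond distance; with no positive distance no bond is ever read.
def Pre_extend_edge_atoms (extendEdgeAtomDict : List (String × Int)) (originalBondList : List (List String)) (validAtomSet : List String) : Prop :=
  (∀ bond ∈ originalBondList, 4 ≤ bond.length) ∨
    ((PySem.Dict.ofList extendEdgeAtomDict).values.all (fun v => v ≤ 0) = true)
instance (extendEdgeAtomDict : List (String × Int)) (originalBondList : List (List String)) (validAtomSet : List String) : Decidable (Pre_extend_edge_atoms extendEdgeAtomDict originalBondList validAtomSet) := by unfold Pre_extend_edge_atoms; infer_instance

def pvWitness_extend_edge_atoms : (List (String × Int)) × List (List String) × List String :=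
  ([("4", 2), ("7", 0)], [["1", "1", "4", "5"], ["1", "1", "5", "6"], ["1", "1", "6", "7"]], ["3"])

def Spec_extend_edge_atoms (extendEdgeAtomDict : List (String × Int)) (originalBondList : List (List String)) (validAtomSet : List String) (out : List String × List String) : Prop := out = extend_edge_atoms_alt extendEdgeAtomDict originalBondList validAtomSet
instance (extendEdgeAtomDict : List (String × Int)) (originalBondList : List (List String)) (validAtomSet : List String) (out : List String × List String) : Decidable (Spec_extend_edge_atoms extendEdgeAtomDict originalBondList validAtomSet out) := by unfold Spec_extend_edge_atoms; infer_instance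

-- ===== CLAIM (what is proved, stated in full; the proofs are below) =====
def Claim_equal_extend_edge_atoms : Prop := ∀ (extendEdgeAtomDict : List (String × Int)) (originalBondList : List (List String)) (validAtomSet : List String), Dom_extend_edge_atoms extendEdgeAtomDict originalBondList validAtomSet → Pre_extend_edge_atoms extendEdgeAtomDict originalBondList validAtomSet → Spec_extend_edge_atoms extendEdgeAtomDict originalBondList validAtomSet (extend_edge_atoms extendEdgeAtomDict originalBondList validAtomSet)

-- ===== LEMMAS AND PROOFS =====

theorem pv_adj_step (d : PySem.Dict String (List String)) (a b x : String) :
    ((let adj2 := d.insert a (d.getD a [] ++ [b])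
      if b != a then adj2.insert b (adj2.getD b [] ++ [a]) else adj2).getD x [])
      = d.getD x [] ++ (if a == x then some b else if b == x then some a else none).toList := by
  by_cases hba : b = a
  · subst hba
    simp only [bne_self_eq_false, Bool.false_eq_true, if_false]
    by_cases hxa : x = b
    · subst hxa; simp [PySem.Dict.getD_insert]
    · simp [PySem.Dict.getD_insert, hxa, beq_iff_eq, Ne.symm hxa]
  · have hne : (b != a) = true := by simp [hba]
    simp only [hne, if_true]
    by_cases hxb : x = b
    · subst hxb
      simp [PySem.Dict.getD_insert, hba, beq_iff_eq, Ne.symm hba]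
    · by_cases hxa : x = a
      · subst hxa
        simp [PySem.Dict.getD_insert, hxb, beq_iff_eq, Ne.symm hxb]
      · simp [PySem.Dict.getD_insert, hxa, hxb, beq_iff_eq, Ne.symm hxa, Ne.symm hxb]

theorem pv_adj_getD_gen (bonds : List (List String)) (x : String) :
    ∀ d : PySem.Dict String (List String),
    (bonds.foldl (fun adj bond =>
      let a := (PySem.List.pyGet? bond 2).getD ""
      let b := (PySem.List.pyGet? bond 3).getD ""
      let adj2 := adj.insert a (adj.getD a [] ++ [b])
      if b != a then adj2.insert b (adj2.getD b [] ++ [a]) else adj2) d).getD x []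
      = d.getD x [] ++ bonds.filterMap (fun bond => pvPairSearch bond x) := by
  induction bonds with
  | nil => simp
  | cons bond bonds ih =>
    intro d
    rw [List.foldl_cons, List.filterMap_cons, ih]
    have hstep := pv_adj_step d ((PySem.List.pyGet? bond 2).getD "") ((PySem.List.pyGet? bond 3).getD "") x
    simp only at hstep ⊢
    cases hps : pvPairSearch bond x with
    | none => simp only [pvPairSearch] at hps; rw [hstep, hps]; simp
    | some v => simp only [pvPairSearch] at hps; rw [hstep, hps]; simp

theorem pv_adj_getD (bonds : List (List String)) (x : String) :
    (pvAdjacency bonds).getD x [] = bonds.filterMap (fun bond => pvPairSearch bond x) := by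
  rw [pvAdjacency, pv_adj_getD_gen]; simp

theorem pv_count_gen (bonds : List (List String)) (x : String) :
    ∀ c0 : Int, bonds.foldl (fun c bond => if (pvPairSearch bond x).isSome then c + 1 else c) c0
      = c0 + ((bonds.filterMap (fun bond => pvPairSearch bond x)).length : Int) := by
  induction bonds with
  | nil => simp
  | cons bond bonds ih =>
    intro c0
    rw [List.foldl_cons, List.filterMap_cons]
    cases h : pvPairSearch bond x <;> simp [h, ih] <;> ring

theorem pv_bondCount_eq (bonds : List (List String)) (x : String) :
    pvBondCount bonds x = (((pvAdjacency bonds).getD x []).length : Int) := by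
  rw [pvBondCount, pv_count_gen, pv_adj_getD]; simp

theorem pv_scan_eq (bonds : List (List String)) (s : String) :
    ∀ acc : List String, bonds.foldl (fun acc2 bond =>
      match pvPairSearch bond s with
      | some nextAtomID => acc2 ++ [nextAtomID]
      | none => acc2) acc = acc ++ bonds.filterMap (fun bond => pvPairSearch bond s) := by
  induction bonds with
  | nil => simp
  | cons bond bonds ih =>
    intro acc
    simp only [List.foldl_cons, List.filterMap_cons]
    cases h : pvPairSearch bond s <;> simp [h, ih]

theorem pv_searchLoop_eq (bonds : List (List String)) (fr : List String) :
    pvSearchLoop bonds fr = fr.foldl (fun acc s => acc ++ (pvAdjacency bonds).getD s []) [] := by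
  unfold pvSearchLoop
  have hf : (fun (acc : List String) (searchAtom : String) => bonds.foldl (fun acc2 bond =>
      match pvPairSearch bond searchAtom with
      | some nextAtomID => acc2 ++ [nextAtomID]
      | none => acc2) acc) = (fun acc s => acc ++ (pvAdjacency bonds).getD s []) := by
    funext acc s
    rw [pv_adj_getD]
    exact pv_scan_eq bonds s acc
  rw [hf]

theorem pv_edges_fold_eq (bonds : List (List String)) (possible edges : List String) :
    possible.foldl (fun e s => if pvBondCount bonds s > 1 then e ++ [s] else e) edges
      = possible.foldl (fun e s => if ((pvAdjacency bonds).getD s []).length > 1 then e ++ [s] else e) edges := by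
  have hf : (fun (e : List String) (s : String) => if pvBondCount bonds s > 1 then e ++ [s] else e)
      = (fun e s => if ((pvAdjacency bonds).getD s []).length > 1 then e ++ [s] else e) := by
    funext e s
    rw [pv_bondCount_eq]
    congr 1
    simp [Nat.one_lt_cast]
  rw [hf]

theorem pv_filter_one_eq (atom : String) (l : List String) :
    l.filter (fun val => !([atom].contains val)) = l.filter (fun v => !(v == atom)) := by
  simp only [List.contains_cons, List.contains_nil, Bool.or_false]

theorem pv_loop_eq (bonds : List (List String)) (atom : String) (bondDist : Int) :
    ∀ (n : Nat) (i : Int), (bondDist + 1 - i).toNat = n →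
    ∀ (frontier : List String) (valid : PySem.Set String) (edges : List String),
      pvFpsLoop bonds [atom] bondDist i frontier valid edges
        = pvAltLoop (pvAdjacency bonds) atom bondDist i frontier valid edges := by
  intro n
  induction n with
  | zero =>
    intro i hi frontier valid edges
    have hgt : ¬ i ≤ bondDist := by omega
    rw [pvFpsLoop, pvAltLoop, if_neg hgt, if_neg hgt]
  | succ n ih =>
    intro i hi frontier valid edges
    by_cases hle : i ≤ bondDist
    · rw [pvFpsLoop, pvAltLoop, if_pos hle, if_pos hle]
      simp only [pv_searchLoop_eq, pv_filter_one_eq, pv_edges_fold_eq]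
      split_ifs <;> exact ih (i + 1) (by omega) _ _ _
    · rw [pvFpsLoop, pvAltLoop, if_neg hle, if_neg hle]

theorem pv_fps_eq (bonds : List (List String)) (atom : String) (d : Int) :
    pvFindPartialStructure atom bonds d
      = pvAltLoop (pvAdjacency bonds) atom d 1 [atom] (PySem.Set.ofList [atom]) [] := by
  show pvFpsLoop bonds [atom] d 1 [atom] (PySem.Set.ofList [atom]) [] = _
  exact pv_loop_eq bonds atom d (d + 1 - 1).toNat 1 rfl [atom] _ _

-- ===== VERDICT (by name: the statement is the Claim_ definition above) =====
theorem extend_edge_atoms_spec : Claim_equal_extend_edge_atoms := by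
  intro extendEdgeAtomDict originalBondList validAtomSet _hdom _hpre
  unfold Spec_extend_edge_atoms extend_edge_atoms extend_edge_atoms_alt
  have hf : (fun (st : PySem.Set String × List String) (p : String × Int) =>
      let total := if p.2 == 0 then st.2 ++ [p.1] else st.2
      let r := pvFindPartialStructure p.1 originalBondList p.2
      let extEdge := r.2.filter (fun val => !(PySem.Set.contains st.1 val))
      (PySem.Set.update st.1 r.1, total ++ extEdge))
      = (fun (st : PySem.Set String × List String) (p : String × Int) =>
      let total := if p.2 == 0 then st.2 ++ [p.1] else st.2
      let r := pvAltLoop (pvAdjacency originalBondList) p.1 p.2 1 [p.1] (PySem.Set.ofList [p.1]) []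
      let extEdge := r.2.filter (fun v => !(PySem.Set.contains st.1 v))
      (PySem.Set.update st.1 r.1, total ++ extEdge)) := by
    funext st p
    simp only [pv_fps_eq]
  rw [hf]
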